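-- pv_equiv track=rewrite | github.com/tfcp68/manual-projects | Исходники/Глава 2. Часть 1/Динамическое программирование1/Динамическое программирование1/На играх/42. Игра в спички/Python/match_game.py | match_game
-- ===== SOURCE A (Python) =====
-- def match_game(n, k):
--     bool_ = [[False] * (n + 1) for _ in range(n + 1)]
--     for j in range(1, n + 1):
--         bool_[0][j] = True
--     for i in range(1, n + 1):
--         for j in range(1, n + 1):
--             m = j + 1
--             if m >= i:
--                 m = i - 1
--             for t in range(1, m + 1):
--                 bool_[i][j] = bool_[i][j] or (not bool_[i-t][t])
--
--     m = k
--     if m > n: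
--         m = n
--     answer = []
--     for t in range(1, m + 1):
--         if not bool_[n - t][t]:
--             answer += [t]
--
--     return answer
-- ===== SOURCE B (Python) =====
-- def match_game(n, k):
--     # DP per row with an incremental cumulative OR: the move bound min(j+1, i-1)
--     # is nondecreasing in j, so each row is filled in O(n).
--     win = [[False] + [True] * n]  # row 0
--     for i in range(1, n + 1):
--         row = [False] * (n + 1)
--         acc = False
--         t = 0
--         for j in range(1, n + 1):
--             cap = min(j + 1, i - 1)
--             while t < cap:
--                 t += 1
--                 acc = acc or (not win[i - t][t])
--             row[j] = acc
--         win.append(row)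
--     m = min(k, n)
--     return [t for t in range(1, m + 1) if not win[n - t][t]]
-- ===== Notes on version B (the rewrite author's own statement) =====
-- stated objective: faster
-- what changed: Instead of recomputing the whole inner OR over t for every cell, B fills each DP row with a single incremental cumulative OR, exploiting that the move bound min(j+1, i-1) is nondecreasing in j.
import Mathlib
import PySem

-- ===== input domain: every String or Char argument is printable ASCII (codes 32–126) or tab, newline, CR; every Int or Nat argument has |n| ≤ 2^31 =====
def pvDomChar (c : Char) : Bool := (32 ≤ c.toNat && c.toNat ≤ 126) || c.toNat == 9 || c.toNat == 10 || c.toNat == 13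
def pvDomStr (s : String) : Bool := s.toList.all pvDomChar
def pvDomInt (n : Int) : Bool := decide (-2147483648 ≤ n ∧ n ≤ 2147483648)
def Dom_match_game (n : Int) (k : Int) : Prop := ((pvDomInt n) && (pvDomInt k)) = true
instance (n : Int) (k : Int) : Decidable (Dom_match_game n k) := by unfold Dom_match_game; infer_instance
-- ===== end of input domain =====

-- B replaces A's per-cell inner OR loop by one incremental cumulative OR per DP row
-- (the move bound min(j+1, i-1) is nondecreasing in j): O(n^2) instead of O(n^3).

-- shared 2-D table indexing helper: bool_[i][j] read / write; every executed access of
-- both ports has a nonnegative in-range index, so .toNat is exact there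
def tget (tbl : List (List Bool)) (i j : Int) : Bool := (tbl.getD i.toNat []).getD j.toNat false
def tset (tbl : List (List Bool)) (i j : Int) (v : Bool) : List (List Bool) :=
  tbl.set i.toNat ((tbl.getD i.toNat []).set j.toNat v)

-- ===== PORT A =====
def stepT (i j : Int) (tbl : List (List Bool)) (t : Int) : List (List Bool) :=
  tset tbl i j (tget tbl i j || !(tget tbl (i - t) t))
def stepJ (i : Int) (tbl : List (List Bool)) (j : Int) : List (List Bool) :=
  let m := j + 1
  let m := if m ≥ i then i - 1 else m
  (PySem.List.pyRange 1 (m+1) 1).foldl (stepT i j) tbl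
def stepI (n : Int) (tbl : List (List Bool)) (i : Int) : List (List Bool) :=
  (PySem.List.pyRange 1 (n+1) 1).foldl (stepJ i) tbl

def match_game (n : Int) (k : Int) : List Int :=
  let tbl := (PySem.List.pyRange 0 (n+1) 1).map (fun _ => PySem.List.pyRepeat [false] (n+1))
  let tbl := (PySem.List.pyRange 1 (n+1) 1).foldl (fun tbl j => tset tbl 0 j true) tbl
  let tbl := (PySem.List.pyRange 1 (n+1) 1).foldl (stepI n) tbl
  let m := if k > n then n else k
  (PySem.List.pyRange 1 (m+1) 1).foldl
    (fun ans t => if !(tget tbl (n - t) t) then ans ++ [t] else ans) []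

-- ===== PORT B =====
-- the 'while t < cap' loop of Source B
def bAdvance (win : List (List Bool)) (i cap t : Int) (acc : Bool) : Int × Bool :=
  if t < cap then bAdvance win i cap (t+1) (acc || !(tget win (i - (t+1)) (t+1))) else (t, acc)
termination_by (cap - t).toNat
decreasing_by omega

def bStepJ (win : List (List Bool)) (i : Int) (st : List Bool × Int × Bool) (j : Int) :
    List Bool × Int × Bool :=
  let cap := min (j+1) (i-1)
  let r := bAdvance win i cap st.2.1 st.2.2
  (st.1.set j.toNat r.2, r.1, r.2)
def bStepI (n : Int) (win : List (List Bool)) (i : Int) : List (List Bool) :=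
  let st := (PySem.List.pyRange 1 (n+1) 1).foldl (bStepJ win i)
      (PySem.List.pyRepeat [false] (n+1), (0 : Int), false)
  win ++ [st.1]

def match_game_alt (n : Int) (k : Int) : List Int :=
  let win := [[false] ++ PySem.List.pyRepeat [true] n]
  let win := (PySem.List.pyRange 1 (n+1) 1).foldl (bStepI n) win
  let m := min k n
  (PySem.List.pyRange 1 (m+1) 1).filter (fun t => !(tget win (n - t) t))

-- ===== PRECONDITION & SPEC =====
def Spec_match_game (n : Int) (k : Int) (out : List Int) : Prop := out = match_game_alt n k
instance (n : Int) (k : Int) (out : List Int) : Decidable (Spec_match_game n k out) := by unfold Spec_match_game; infer_instance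

-- ===== CLAIM (what is proved, stated in full; the proofs are below) =====
def Claim_equal_match_game : Prop := ∀ (n : Int) (k : Int), Dom_match_game n k → Spec_match_game n k (match_game n k)

-- ===== LEMMAS AND PROOFS =====

-- the mathematical DP value: W i j = the table entry bool_[i][j] both programs compute
def W : Nat → Nat → Bool
  | 0, j => decide (j ≠ 0)
  | (i+1), j => (List.range (min (j+1) i)).any (fun s => ! W (i - s) (s+1))
termination_by i _ => i
decreasing_by omega

def OrUpTo (i c : Nat) : Bool := (List.range c).any (fun s => ! W (i - (s+1)) (s+1))

-- table model: entry (a, b) with Nat indices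
def mdl (tbl : List (List Bool)) (a b : Nat) : Bool := (tbl.getD a []).getD b false

def Dims (Nn : Nat) (tbl : List (List Bool)) : Prop :=
  tbl.length = Nn ∧ ∀ r ∈ tbl, r.length = Nn

-- A's table state while filling row i, columns 1..j done
def TAfun (Nn i j : Nat) (a b : Nat) : Bool :=
  if a ≤ Nn ∧ 1 ≤ b ∧ b ≤ Nn ∧ (a < i ∨ (a = i ∧ b ≤ j)) then W a b else false

def rng1 (M : Nat) : List Int := (List.range M).map (fun (s : Nat) => ((1:Int) + (s : Int)))

lemma pyRange1 (b : Int) : PySem.List.pyRange 1 (b+1) 1 = rng1 b.toNat := by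
  rw [PySem.List.pyRange_one, show (b+1-1 : Int) = b from by ring, rng1]

lemma rng1_succ (M : Nat) : rng1 (M+1) = rng1 M ++ [(1:Int)+(M:Int)] := by
  simp [rng1, List.range_succ]

lemma W_zero (b : Nat) : W 0 b = decide (b ≠ 0) := by rw [W]

lemma W_succ (i j : Nat) : W (i+1) j = (List.range (min (j+1) i)).any (fun s => ! W (i - s) (s+1)) := by
  rw [W]

lemma OrUpTo_zero (i : Nat) : OrUpTo i 0 = false := by simp [OrUpTo]

lemma OrUpTo_succ (i c : Nat) : OrUpTo i (c+1) = (OrUpTo i c || ! W (i - (c+1)) (c+1)) := by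
  simp [OrUpTo, List.range_succ]

lemma W_eq_OrUpTo (i j : Nat) (hi : 1 ≤ i) : W i j = OrUpTo i (min (j+1) (i-1)) := by
  obtain ⟨i', rfl⟩ : ∃ i', i = i'+1 := ⟨i-1, by omega⟩
  rw [W_succ, OrUpTo]
  simp [Nat.succ_sub_succ]

lemma Dims_row_len {Nn : Nat} {tbl : List (List Bool)} (hD : Dims Nn tbl) (x : Nat)
    (hx : x < Nn) : (tbl.getD x []).length = Nn := by
  have hx' : x < tbl.length := by rw [hD.1]; exact hx
  rw [List.getD_eq_getElem _ _ hx']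
  exact hD.2 _ (List.getElem_mem hx')

lemma getD_set_gen {α : Type} [Inhabited α] (l : List α) (x : Nat) (hx : x < l.length)
    (r : α) (b : Nat) (d : α) :
    (l.set x r).getD b d = if b = x then r else l.getD b d := by
  rw [List.getD_eq_getElem?_getD, List.getD_eq_getElem?_getD, List.getElem?_set]
  by_cases h : x = b
  · subst h; simp [hx]
  · simp [h, Ne.symm h]

lemma row_set_getD (l : List Bool) (x : Nat) (hx : x < l.length) (v : Bool) (b : Nat) :
    (l.set x v).getD b false = if b = x then v else l.getD b false :=
  getD_set_gen l x hx v b false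

lemma mdl_tset (tbl : List (List Bool)) (i j : Int) (v : Bool)
    (h1 : i.toNat < tbl.length) (h2 : j.toNat < (tbl.getD i.toNat []).length) (a b : Nat) :
    mdl (tset tbl i j v) a b = if a = i.toNat ∧ b = j.toNat then v else mdl tbl a b := by
  simp only [mdl, tset]
  rw [getD_set_gen _ _ h1]
  by_cases ha : a = i.toNat
  · subst ha
    simp only [if_true, true_and]
    rw [row_set_getD _ _ h2]
  · simp [ha]

lemma Dims_tset {Nn : Nat} {tbl : List (List Bool)} (hD : Dims Nn tbl) (i j : Int) (v : Bool)
    (hi : i.toNat < Nn) : Dims Nn (tset tbl i j v) := by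
  refine ⟨by simp [tset, hD.1], ?_⟩
  intro r hr
  rcases List.mem_or_eq_of_mem_set hr with h | h
  · exact hD.2 _ h
  · subst h
    rw [List.length_set]
    exact Dims_row_len hD _ hi

lemma A_tfold (Nn : Nat) (i j : Int) (hi : 1 ≤ i) (hiN : i.toNat ≤ Nn) (hj : 1 ≤ j)
    (hjN : j.toNat ≤ Nn) (M : Nat) (hM : M ≤ i.toNat - 1) (tbl : List (List Bool))
    (hD : Dims (Nn+1) tbl) :
    Dims (Nn+1) ((rng1 M).foldl (stepT i j) tbl) ∧
    ∀ a b : Nat, mdl ((rng1 M).foldl (stepT i j) tbl) a b =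
      if a = i.toNat ∧ b = j.toNat then
        (mdl tbl i.toNat j.toNat ||
          (List.range M).any (fun s => ! mdl tbl (i.toNat - (s+1)) (s+1)))
      else mdl tbl a b := by
  induction M with
  | zero =>
    refine ⟨by simpa [rng1] using hD, ?_⟩
    intro a b
    simp only [rng1, List.range_zero, List.map_nil, List.foldl_nil, List.any_nil,
      Bool.or_false]
    split_ifs with h
    · obtain ⟨rfl, rfl⟩ := h; rfl
    · rfl
  | succ M ih =>
    obtain ⟨ihD, ihm⟩ := ih (by omega)
    rw [rng1_succ, List.foldl_append]
    simp only [List.foldl_cons, List.foldl_nil]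
    set tbl' := (rng1 M).foldl (stepT i j) tbl with htbl'
    have hlen : i.toNat < tbl'.length := by rw [ihD.1]; omega
    have hrow : j.toNat < (tbl'.getD i.toNat []).length := by
      rw [Dims_row_len ihD _ (by omega)]; omega
    unfold stepT
    refine ⟨Dims_tset ihD _ _ _ (by omega), ?_⟩
    intro a b
    rw [mdl_tset _ _ _ _ hlen hrow]
    have e2 : tget tbl' (i - (1+(M:Int))) (1+(M:Int)) = mdl tbl' (i.toNat - (M+1)) (M+1) := by
      have g1 : ((i - (1+(M:Int))).toNat) = i.toNat - (M+1) := by omega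
      have g2 : ((1:Int)+(M:Int)).toNat = M+1 := by omega
      simp [tget, mdl, g1, g2]
    have hv1 : mdl tbl' i.toNat j.toNat = (mdl tbl i.toNat j.toNat ||
        (List.range M).any (fun s => ! mdl tbl (i.toNat-(s+1)) (s+1))) := by
      rw [ihm, if_pos ⟨rfl, rfl⟩]
    have hv2 : mdl tbl' (i.toNat-(M+1)) (M+1) = mdl tbl (i.toNat-(M+1)) (M+1) := by
      rw [ihm, if_neg]; rintro ⟨h1, h2⟩; omega
    split_ifs with h
    · rw [show tget tbl' i j = mdl tbl' i.toNat j.toNat from rfl, e2, hv1, hv2,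
        List.range_succ]
      simp [Bool.or_assoc]
    · rw [ihm, if_neg h]

lemma any_congr_mem {α : Type} (l : List α) (f g : α → Bool) (h : ∀ x ∈ l, f x = g x) :
    l.any f = l.any g := by
  induction l with
  | nil => rfl
  | cons x xs ih => simp only [List.any_cons, h x (List.mem_cons_self),
      ih (fun y hy => h y (List.mem_cons_of_mem _ hy))]

lemma A_jfold (Nn : Nat) (i : Int) (hi : 1 ≤ i) (hiN : i.toNat ≤ Nn) (M : Nat) (hM : M ≤ Nn)
    (tbl : List (List Bool)) (hD : Dims (Nn+1) tbl)
    (hm : ∀ a b, mdl tbl a b = TAfun Nn i.toNat 0 a b) :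
    Dims (Nn+1) ((rng1 M).foldl (stepJ i) tbl) ∧
    ∀ a b, mdl ((rng1 M).foldl (stepJ i) tbl) a b = TAfun Nn i.toNat M a b := by
  induction M with
  | zero =>
    refine ⟨by simpa [rng1] using hD, ?_⟩
    intro a b
    simpa [rng1] using hm a b
  | succ M ih =>
    obtain ⟨ihD, ihm⟩ := ih (by omega)
    rw [rng1_succ, List.foldl_append]
    simp only [List.foldl_cons, List.foldl_nil]
    set tbl' := (rng1 M).foldl (stepJ i) tbl with htbl'
    simp only [stepJ]
    set mI : Int := if ((1:Int)+(M:Int))+1 ≥ i then i - 1 else ((1:Int)+(M:Int))+1 with hmI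
    have hmt : mI.toNat = min (M+2) (i.toNat - 1) := by
      rw [hmI]; split_ifs <;> omega
    rw [pyRange1 mI]
    obtain ⟨tD, tm⟩ := A_tfold Nn i ((1:Int)+(M:Int)) hi hiN (by omega) (by omega)
      mI.toNat (by omega) tbl' ihD
    refine ⟨tD, ?_⟩
    intro a b
    rw [tm a b]
    have g2 : ((1:Int)+(M:Int)).toNat = M+1 := by omega
    rw [g2]
    have hcell : mdl tbl' i.toNat (M+1) = false := by
      rw [ihm]; unfold TAfun; rw [if_neg]
      rintro ⟨_, _, _, h | ⟨_, h⟩⟩ <;> omega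
    have hany : ∀ s, s + 1 ≤ i.toNat - 1 →
        mdl tbl' (i.toNat - (s+1)) (s+1) = W (i.toNat - (s+1)) (s+1) := by
      intro s hs
      rw [ihm]; unfold TAfun; rw [if_pos]
      exact ⟨by omega, by omega, by omega, Or.inl (by omega)⟩
    have hW : (mdl tbl' i.toNat (M+1) ||
        (List.range mI.toNat).any (fun s => ! mdl tbl' (i.toNat - (s+1)) (s+1))) =
        W i.toNat (M+1) := by
      rw [hcell, Bool.false_or, W_eq_OrUpTo i.toNat (M+1) (by omega), OrUpTo, hmt]
      exact any_congr_mem _ _ _ (fun s hs => by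
        rw [hany s (by have := List.mem_range.mp hs; omega)])
    rw [hW]
    by_cases h : a = i.toNat ∧ b = M+1
    · obtain ⟨rfl, rfl⟩ := h
      rw [if_pos ⟨rfl, rfl⟩]
      unfold TAfun
      rw [if_pos ⟨by omega, by omega, by omega, Or.inr ⟨rfl, by omega⟩⟩]
    · rw [if_neg h, ihm a b]
      unfold TAfun
      split_ifs with h1 h2 <;> first | rfl | omega

lemma A_ifold (Nn : Nat) (n : Int) (hn0 : 0 ≤ n) (hNn : n.toNat = Nn) (M : Nat) (hM : M ≤ Nn)
    (tbl : List (List Bool)) (hD : Dims (Nn+1) tbl)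
    (hm : ∀ a b, mdl tbl a b = TAfun Nn 1 0 a b) :
    Dims (Nn+1) ((rng1 M).foldl (stepI n) tbl) ∧
    ∀ a b, mdl ((rng1 M).foldl (stepI n) tbl) a b = TAfun Nn (M+1) 0 a b := by
  induction M with
  | zero =>
    refine ⟨by simpa [rng1] using hD, ?_⟩
    intro a b
    simpa [rng1] using hm a b
  | succ M ih =>
    obtain ⟨ihD, ihm⟩ := ih (by omega)
    rw [rng1_succ, List.foldl_append]
    simp only [List.foldl_cons, List.foldl_nil]
    set tbl' := (rng1 M).foldl (stepI n) tbl with htbl'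
    have g2 : ((1:Int)+(M:Int)).toNat = M+1 := by omega
    unfold stepI
    rw [pyRange1 n, hNn]
    obtain ⟨jD, jm⟩ := A_jfold Nn ((1:Int)+(M:Int)) (by omega) (by omega) Nn le_rfl tbl' ihD
      (fun a b => by rw [ihm a b, g2])
    refine ⟨jD, ?_⟩
    intro a b
    rw [jm a b, g2]
    unfold TAfun
    split_ifs <;> first | rfl | omega

lemma A_row0 (Nn M : Nat) (hM : M ≤ Nn) (tbl : List (List Bool)) (hD : Dims (Nn+1) tbl)
    (hm : ∀ a b, mdl tbl a b = false) :
    Dims (Nn+1) ((rng1 M).foldl (fun tbl j => tset tbl 0 j true) tbl) ∧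
    ∀ a b, mdl ((rng1 M).foldl (fun tbl j => tset tbl 0 j true) tbl) a b =
      if a = 0 ∧ 1 ≤ b ∧ b ≤ M then true else false := by
  induction M with
  | zero =>
    refine ⟨by simpa [rng1] using hD, ?_⟩
    intro a b
    simp only [rng1, List.range_zero, List.map_nil, List.foldl_nil]
    rw [hm a b, if_neg]
    rintro ⟨_, h1, h2⟩; omega
  | succ M ih =>
    obtain ⟨ihD, ihm⟩ := ih (by omega)
    rw [rng1_succ, List.foldl_append]
    simp only [List.foldl_cons, List.foldl_nil]
    set tbl' := (rng1 M).foldl (fun tbl j => tset tbl 0 j true) tbl with htbl'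
    have hlen : (0:Int).toNat < tbl'.length := by rw [ihD.1]; omega
    have hrow : ((1:Int)+(M:Int)).toNat < (tbl'.getD (0:Int).toNat []).length := by
      rw [Dims_row_len ihD _ (by omega)]; omega
    refine ⟨Dims_tset ihD _ _ _ (by omega), ?_⟩
    intro a b
    rw [mdl_tset _ _ _ _ hlen hrow, ihm a b]
    simp only [Int.toNat_zero]
    rw [show ((1:Int)+(M:Int)).toNat = M+1 from by omega]
    split_ifs <;> first | rfl | omega

lemma A_table (Nn : Nat) (n : Int) (hn0 : 0 ≤ n) (hNn : n.toNat = Nn) (a b : Nat)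
    (ha : a ≤ Nn) (hb1 : 1 ≤ b) (hb : b ≤ Nn) :
    mdl ((PySem.List.pyRange 1 (n+1) 1).foldl (stepI n)
      ((PySem.List.pyRange 1 (n+1) 1).foldl (fun tbl j => tset tbl 0 j true)
        ((PySem.List.pyRange 0 (n+1) 1).map (fun _ => PySem.List.pyRepeat [false] (n+1))))) a b
      = W a b := by
  set tbl0 : List (List Bool) :=
    (PySem.List.pyRange 0 (n+1) 1).map (fun _ => PySem.List.pyRepeat [false] (n+1)) with htbl0
  have hrep : PySem.List.pyRepeat [false] (n+1) = List.replicate (Nn+1) false := by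
    rw [PySem.List.pyRepeat_singleton]; congr 1; omega
  have hD0 : Dims (Nn+1) tbl0 := by
    constructor
    · rw [htbl0, List.length_map, PySem.List.length_pyRange_one]; omega
    · intro r hr
      rw [htbl0] at hr
      obtain ⟨x, hx, rfl⟩ := List.mem_map.mp hr
      rw [hrep, List.length_replicate]
  have hall : ∀ r ∈ tbl0, r = List.replicate (Nn+1) false := by
    intro r hr
    rw [htbl0] at hr
    obtain ⟨x, _, rfl⟩ := List.mem_map.mp hr
    exact hrep
  have hm0 : ∀ a b, mdl tbl0 a b = false := by
    intro a b
    unfold mdl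
    by_cases hal : a < tbl0.length
    · rw [List.getD_eq_getElem _ _ hal, hall _ (List.getElem_mem hal),
        List.getD_eq_getElem?_getD, List.getElem?_replicate]
      split_ifs <;> rfl
    · rw [show tbl0.getD a [] = [] from List.getD_eq_default _ _ (by omega)]
      rfl
  rw [pyRange1 n, hNn]
  obtain ⟨rD, rm⟩ := A_row0 Nn Nn le_rfl tbl0 hD0 hm0
  obtain ⟨iD, im⟩ := A_ifold Nn n hn0 hNn Nn le_rfl _ rD (fun a b => by
    rw [rm a b]
    unfold TAfun
    split_ifs with h1 h2 <;> first | rfl | omega |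
      (obtain ⟨rfl, hbb1, hbb2⟩ := h1; rw [W_zero]; simp; omega))
  rw [im a b]
  unfold TAfun
  rw [if_pos ⟨ha, hb1, hb, Or.inl (by omega)⟩]

lemma bAdvance_spec (Nn : Nat) (win : List (List Bool)) (i : Int) (hi : 1 ≤ i) (hiN : i.toNat ≤ Nn)
    (hwin : ∀ a b : Nat, a < i.toNat → 1 ≤ b → b ≤ Nn → mdl win a b = W a b)
    (cap : Int) (hcap : cap ≤ i - 1) :
    ∀ t : Int, 0 ≤ t → t ≤ cap →
      bAdvance win i cap t (OrUpTo i.toNat t.toNat) = (cap, OrUpTo i.toNat cap.toNat) := by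
  intro t ht htc
  generalize hd : (cap - t).toNat = d
  induction d generalizing t with
  | zero =>
    have he : t = cap := by omega
    subst he
    rw [bAdvance, if_neg (by omega)]
  | succ d ihd =>
    rw [bAdvance, if_pos (by omega)]
    have harg : (OrUpTo i.toNat t.toNat || !tget win (i - (t+1)) (t+1)) =
        OrUpTo i.toNat (t+1).toNat := by
      have e : tget win (i - (t+1)) (t+1) = mdl win (i.toNat - (t.toNat+1)) (t.toNat+1) := by
        have g1 : (i - (t+1)).toNat = i.toNat - (t.toNat+1) := by omega
        have g2 : ((t:Int)+1).toNat = t.toNat+1 := by omega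
        simp [tget, mdl, g1, g2]
      rw [e, hwin _ _ (by omega) (by omega) (by omega),
        show ((t:Int)+1).toNat = t.toNat + 1 from by omega, OrUpTo_succ]
    rw [harg]
    exact ihd (t+1) (by omega) (by omega) (by omega)

def tcur (i : Int) (M : Nat) : Int := if M = 0 then 0 else min (M+1) (i-1)

lemma B_jfold (Nn : Nat) (win : List (List Bool)) (i : Int) (hi : 1 ≤ i) (hiN : i.toNat ≤ Nn)
    (hwin : ∀ a b : Nat, a < i.toNat → 1 ≤ b → b ≤ Nn → mdl win a b = W a b)
    (M : Nat) (hM : M ≤ Nn) :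
    ((rng1 M).foldl (bStepJ win i) (List.replicate (Nn+1) false, (0:Int), false)).2.1 = tcur i M ∧
    ((rng1 M).foldl (bStepJ win i) (List.replicate (Nn+1) false, (0:Int), false)).2.2 =
      OrUpTo i.toNat (tcur i M).toNat ∧
    ((rng1 M).foldl (bStepJ win i) (List.replicate (Nn+1) false, (0:Int), false)).1.length = Nn+1 ∧
    ∀ b : Nat, ((rng1 M).foldl (bStepJ win i) (List.replicate (Nn+1) false, (0:Int), false)).1.getD b false =
      if 1 ≤ b ∧ b ≤ M then W i.toNat b else false := by
  induction M with
  | zero =>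
    refine ⟨by simp [rng1, tcur], by simp [rng1, tcur, OrUpTo_zero], by simp [rng1], ?_⟩
    intro b
    simp only [rng1, List.range_zero, List.map_nil, List.foldl_nil]
    rw [if_neg (by omega), List.getD_eq_getElem?_getD, List.getElem?_replicate]
    split_ifs <;> rfl
  | succ M ih =>
    obtain ⟨iht, iha, ihl, ihr⟩ := ih (by omega)
    simp only [rng1_succ, List.foldl_append, List.foldl_cons, List.foldl_nil]
    set st' := (rng1 M).foldl (bStepJ win i) (List.replicate (Nn+1) false, (0:Int), false)
      with hst'
    simp only [bStepJ]
    set capI : Int := min (((1:Int)+(M:Int))+1) (i-1) with hcapI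
    have hc : capI = tcur i (M+1) := by
      rw [tcur, if_neg (Nat.succ_ne_zero M)]; omega
    have htr : 0 ≤ tcur i M ∧ tcur i M ≤ capI := by
      rw [tcur]; split_ifs <;> omega
    rw [iht, iha, bAdvance_spec Nn win i hi hiN hwin capI (by omega) (tcur i M) htr.1 htr.2]
    refine ⟨hc, by rw [hc], by rw [List.length_set, ihl], ?_⟩
    intro b
    rw [row_set_getD _ _ (by rw [ihl]; omega)]
    rw [show ((1:Int)+(M:Int)).toNat = M+1 from by omega]
    by_cases hb : b = M+1
    · subst hb
      rw [if_pos rfl, if_pos ⟨by omega, le_rfl⟩,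
        W_eq_OrUpTo i.toNat (M+1) (by omega)]
      show OrUpTo i.toNat capI.toNat = OrUpTo i.toNat (min (M+1+1) (i.toNat-1))
      congr 1
      omega
    · rw [if_neg hb, ihr b]
      split_ifs <;> first | rfl | omega

lemma B_ifold (Nn : Nat) (n : Int) (hn0 : 0 ≤ n) (hNn : n.toNat = Nn) (M : Nat) (hM : M ≤ Nn) :
    ((rng1 M).foldl (bStepI n) [[false] ++ List.replicate Nn true]).length = M+1 ∧
    ∀ a b : Nat, a ≤ M → 1 ≤ b → b ≤ Nn →
      mdl ((rng1 M).foldl (bStepI n) [[false] ++ List.replicate Nn true]) a b = W a b := by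
  induction M with
  | zero =>
    refine ⟨by simp [rng1], ?_⟩
    intro a b ha hb1 hb
    have haz : a = 0 := by omega
    subst haz
    obtain ⟨b', rfl⟩ : ∃ b', b = b'+1 := ⟨b-1, by omega⟩
    simp only [rng1, List.range_zero, List.map_nil, List.foldl_nil]
    unfold mdl
    rw [List.getD_cons_zero, List.cons_append, List.getD_cons_succ, List.nil_append,
      List.getD_eq_getElem?_getD, List.getElem?_replicate, if_pos (by omega : b' < Nn),
      W_zero]
    rfl
  | succ M ih =>
    obtain ⟨ihl, ihm⟩ := ih (by omega)
    simp only [rng1_succ, List.foldl_append, List.foldl_cons, List.foldl_nil]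
    set win' := (rng1 M).foldl (bStepI n) [[false] ++ List.replicate Nn true] with hwin'
    simp only [bStepI]
    rw [pyRange1 n, hNn,
      show PySem.List.pyRepeat [false] (n+1) = List.replicate (Nn+1) false from by
        rw [PySem.List.pyRepeat_singleton]; congr 1; omega]
    obtain ⟨jt, ja, jl, jr⟩ := B_jfold Nn win' ((1:Int)+(M:Int)) (by omega) (by omega)
      (fun a b ha hb1 hb => ihm a b (by omega) hb1 hb) Nn le_rfl
    refine ⟨by simp [ihl], ?_⟩
    intro a b ha hb1 hb
    set rr := (List.foldl (bStepJ win' ((1:Int)+(M:Int)))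
      (List.replicate (Nn+1) false, (0:Int), false) (rng1 Nn)).1 with hrr
    by_cases haM : a ≤ M
    · unfold mdl
      have hgl : (win' ++ [rr]).getD a [] = win'.getD a [] := by
        rw [List.getD_eq_getElem?_getD (l := win' ++ [rr]),
          List.getElem?_append_left (by rw [ihl]; omega), ← List.getD_eq_getElem?_getD]
      rw [hgl]
      exact ihm a b haM hb1 hb
    · have haa : a = M+1 := by omega
      subst haa
      unfold mdl
      have hgr : (win' ++ [rr]).getD (M+1) [] = rr := by
        rw [List.getD_eq_getElem?_getD (l := win' ++ [rr]),
          List.getElem?_append_right (by rw [ihl]), ihl]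
        simp
      rw [hgr, jr b, if_pos ⟨hb1, hb⟩, show ((1:Int)+(M:Int)).toNat = M+1 from by omega]

lemma B_table (Nn : Nat) (n : Int) (hn0 : 0 ≤ n) (hNn : n.toNat = Nn) (a b : Nat)
    (ha : a ≤ Nn) (hb1 : 1 ≤ b) (hb : b ≤ Nn) :
    mdl ((PySem.List.pyRange 1 (n+1) 1).foldl (bStepI n) [[false] ++ PySem.List.pyRepeat [true] n]) a b
      = W a b := by
  rw [pyRange1 n, hNn,
    show PySem.List.pyRepeat [true] n = List.replicate Nn true from by
      rw [PySem.List.pyRepeat_singleton, hNn]]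
  exact (B_ifold Nn n hn0 hNn Nn le_rfl).2 a b ha hb1 hb

-- ===== VERDICT (by name: the statement is the Claim_ definition above) =====
theorem match_game_spec : Claim_equal_match_game := by
  intro n k _
  unfold Spec_match_game
  show match_game n k = match_game_alt n k
  simp only [match_game, match_game_alt]
  rw [show (if k > n then n else k) = min k n from by split_ifs <;> omega]
  rw [PySem.List.foldl_append_if_eq_filter]
  rw [List.nil_append]
  apply List.filter_congr
  intro t ht
  obtain ⟨ht1, ht2⟩ := PySem.List.mem_pyRange_one.mp ht
  have hn0 : 0 ≤ n := by omega
  congr 1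
  rw [show tget ((PySem.List.pyRange 1 (n+1) 1).foldl (stepI n)
      ((PySem.List.pyRange 1 (n+1) 1).foldl (fun tbl j => tset tbl 0 j true)
        ((PySem.List.pyRange 0 (n+1) 1).map (fun _ => PySem.List.pyRepeat [false] (n+1)))))
      (n - t) t
    = mdl ((PySem.List.pyRange 1 (n+1) 1).foldl (stepI n)
      ((PySem.List.pyRange 1 (n+1) 1).foldl (fun tbl j => tset tbl 0 j true)
        ((PySem.List.pyRange 0 (n+1) 1).map (fun _ => PySem.List.pyRepeat [false] (n+1)))))
      (n - t).toNat t.toNat from rfl]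
  rw [show tget ((PySem.List.pyRange 1 (n+1) 1).foldl (bStepI n)
      [[false] ++ PySem.List.pyRepeat [true] n]) (n - t) t
    = mdl ((PySem.List.pyRange 1 (n+1) 1).foldl (bStepI n)
      [[false] ++ PySem.List.pyRepeat [true] n]) (n - t).toNat t.toNat from rfl]
  rw [A_table n.toNat n hn0 rfl (n - t).toNat t.toNat (by omega) (by omega) (by omega),
    B_table n.toNat n hn0 rfl (n - t).toNat t.toNat (by omega) (by omega) (by omega)]
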